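-- pv_equiv track=rewrite | github.com/xiaoBingge114514/VRChat-OSC-Chat-Tool | VRChat常驻消息工具1.3.py | get_lyric
-- ===== SOURCE A (Python) =====
-- def get_lyric(lyrics, pos):
--     if not lyrics:
--         return "", ""
--     left, r, idx = 0, len(lyrics) - 1, -1
--     while left <= r:
--         m = (left + r) // 2
--         if lyrics[m][0] <= pos:
--             idx, left = m, m + 1
--         else:
--             r = m - 1
--     if idx < 0:
--         return lyrics[0][1], lyrics[1][1] if len(lyrics) > 1 else ""
--     return lyrics[idx][1], lyrics[idx + 1][1] if idx + 1 < len(lyrics) else ""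
-- ===== SOURCE B (Python) =====
-- def get_lyric(lyrics, pos):
--     if not lyrics:
--         return "", ""
--     idx = -1
--     for i, (t, _) in enumerate(lyrics):
--         if t <= pos:
--             idx = i
--     if idx < 0:
--         return lyrics[0][1], lyrics[1][1] if len(lyrics) > 1 else ""
--     return lyrics[idx][1], lyrics[idx + 1][1] if idx + 1 < len(lyrics) else ""
-- ===== Notes on version B (the rewrite author's own statement) =====
-- stated objective: simpler
-- what changed: Replaces the hand-written binary search over (left, r, idx) with a single forward pass keeping the last index whose timestamp is <= pos; the return block is unchanged; Pre_ restricts to inputs where the matching timestamps form a prefix (all sorted lyric lists qualify), since elsewhere the bisection's answer is path-dependent.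
-- outside the precondition, e.g. on get_lyric([(5, 'a'), (1, 'b')], 1): A returns ('a', 'b'), B returns ('b', '')
import Mathlib
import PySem

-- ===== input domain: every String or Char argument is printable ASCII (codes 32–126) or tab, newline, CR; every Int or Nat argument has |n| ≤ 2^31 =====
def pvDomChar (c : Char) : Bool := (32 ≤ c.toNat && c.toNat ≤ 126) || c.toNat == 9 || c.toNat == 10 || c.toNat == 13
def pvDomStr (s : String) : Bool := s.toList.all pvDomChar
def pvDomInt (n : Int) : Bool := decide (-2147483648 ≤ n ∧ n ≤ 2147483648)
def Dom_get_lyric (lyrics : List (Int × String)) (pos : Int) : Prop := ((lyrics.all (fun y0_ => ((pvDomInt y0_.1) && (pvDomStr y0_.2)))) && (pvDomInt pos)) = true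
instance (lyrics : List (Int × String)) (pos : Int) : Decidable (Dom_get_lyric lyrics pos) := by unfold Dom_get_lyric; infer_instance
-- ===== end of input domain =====

-- B replaces A's hand-written binary search with a single forward scan keeping the last
-- index whose timestamp is <= pos (simpler, same return block); equal on timestamp-sorted lists.

-- ===== PORT A =====
-- the while-loop of A: state (left, r, idx), returns the final idx
def getLyricLoop (lyrics : List (Int × String)) (pos : Int) (left r idx : Int) : Int :=
  if h : left ≤ r then
    let m := PySem.Int.floordiv (left + r) 2
    if ((PySem.List.pyGet? lyrics m).getD (0, "")).1 ≤ pos then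
      getLyricLoop lyrics pos (m + 1) r m
    else
      getLyricLoop lyrics pos left (m - 1) idx
  else idx
termination_by (r - left + 1).toNat
decreasing_by
  · have hb := PySem.Int.floordiv_two_mid_bounds h; omega
  · have hb := PySem.Int.floordiv_two_mid_bounds h; omega

def get_lyric (lyrics : List (Int × String)) (pos : Int) : String × String :=
  if lyrics = [] then ("", "")
  else
    let idx := getLyricLoop lyrics pos 0 ((lyrics.length : Int) - 1) (-1)
    if idx < 0 then
      (((PySem.List.pyGet? lyrics 0).getD (0, "")).2,
       if 1 < lyrics.length then ((PySem.List.pyGet? lyrics 1).getD (0, "")).2 else "")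
    else
      (((PySem.List.pyGet? lyrics idx).getD (0, "")).2,
       if idx + 1 < (lyrics.length : Int) then ((PySem.List.pyGet? lyrics (idx + 1)).getD (0, "")).2 else "")

-- ===== PORT B =====
def get_lyric_alt (lyrics : List (Int × String)) (pos : Int) : String × String :=
  if lyrics = [] then ("", "")
  else
    let idx := (PySem.List.enumerate lyrics 0).foldl
      (fun acc ip => if ip.2.1 ≤ pos then ip.1 else acc) (-1)
    if idx < 0 then
      (((PySem.List.pyGet? lyrics 0).getD (0, "")).2,
       if 1 < lyrics.length then ((PySem.List.pyGet? lyrics 1).getD (0, "")).2 else "")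
    else
      (((PySem.List.pyGet? lyrics idx).getD (0, "")).2,
       if idx + 1 < (lyrics.length : Int) then ((PySem.List.pyGet? lyrics (idx + 1)).getD (0, "")).2 else "")

-- ===== PRECONDITION & SPEC =====
-- Pre_ excludes inputs where the entries with timestamp ≤ pos do not form a prefix of the list
-- (the list is unsorted around pos): there A's binary-search answer is an accident of the
-- bisection path, while B keeps the last matching line. Every timestamp-sorted lyric list
-- (the function's real domain) satisfies Pre_ for every pos.
def Pre_get_lyric (lyrics : List (Int × String)) (pos : Int) : Prop :=
  lyrics.Pairwise (fun a b => b.1 ≤ pos → a.1 ≤ pos)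
instance (lyrics : List (Int × String)) (pos : Int) : Decidable (Pre_get_lyric lyrics pos) := by unfold Pre_get_lyric; infer_instance

def pvWitness_get_lyric : (List (Int × String)) × Int := ([(1, "hello"), (3, "world"), (3, "again")], 2)

def Spec_get_lyric (lyrics : List (Int × String)) (pos : Int) (out : String × String) : Prop := out = get_lyric_alt lyrics pos
instance (lyrics : List (Int × String)) (pos : Int) (out : String × String) : Decidable (Spec_get_lyric lyrics pos out) := by unfold Spec_get_lyric; infer_instance

-- ===== CLAIM (what is proved, stated in full; the proofs are below) =====
def Claim_equal_get_lyric : Prop := ∀ (lyrics : List (Int × String)) (pos : Int), Dom_get_lyric lyrics pos → Pre_get_lyric lyrics pos → Spec_get_lyric lyrics pos (get_lyric lyrics pos)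

-- ===== LEMMAS AND PROOFS =====

-- L = number of leading entries with timestamp ≤ pos
def lyrL : List (Int × String) → Int → Nat
  | [], _ => 0
  | x :: xs, pos => if x.1 ≤ pos then lyrL xs pos + 1 else 0

lemma lyrL_le (lyrics : List (Int × String)) (pos : Int) : lyrL lyrics pos ≤ lyrics.length := by
  induction lyrics with
  | nil => simp [lyrL]
  | cons x xs ih => by_cases h : x.1 ≤ pos <;> simp [lyrL, h] <;> omega

-- characterization of the predicate by position, on a sorted list
lemma lyrL_char (lyrics : List (Int × String)) (pos : Int)
    (hs : lyrics.Pairwise (fun a b => b.1 ≤ pos → a.1 ≤ pos)) :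
    ∀ j (h : j < lyrics.length), (lyrics[j].1 ≤ pos ↔ j < lyrL lyrics pos) := by
  induction lyrics with
  | nil => intro j h; simp at h
  | cons x xs ih =>
    rcases List.pairwise_cons.mp hs with ⟨hx, hxs⟩
    intro j hj
    cases j with
    | zero =>
      by_cases h : x.1 ≤ pos <;> simp [lyrL, h]
    | succ j =>
      have hj' : j < xs.length := by simpa using hj
      by_cases h : x.1 ≤ pos
      · simpa [lyrL, h] using ih hxs j hj'
      · have : ¬ xs[j].1 ≤ pos := fun hh => h (hx _ (List.getElem_mem hj') hh)
        simp [lyrL, h, this]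

-- A's loop returns L - 1 on a sorted list
lemma getLyricLoop_eq (lyrics : List (Int × String)) (pos : Int)
    (C : ∀ j (h : j < lyrics.length), (lyrics[j].1 ≤ pos ↔ j < lyrL lyrics pos)) :
    ∀ (n : Nat) (left r : Int), (r - left + 1).toNat ≤ n →
      0 ≤ left → r ≤ (lyrics.length : Int) - 1 →
      left ≤ (lyrL lyrics pos : Int) → (lyrL lyrics pos : Int) ≤ r + 1 →
      getLyricLoop lyrics pos left r (left - 1) = (lyrL lyrics pos : Int) - 1 := by
  intro n
  induction n with
  | zero =>
    intro left r hn h0 hr hL1 hL2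
    rw [getLyricLoop]
    have : ¬ left ≤ r := by omega
    simp [this]
    omega
  | succ n ih =>
    intro left r hn h0 hr hL1 hL2
    rw [getLyricLoop]
    by_cases h : left ≤ r
    · simp only [h, dif_pos]
      have hb := PySem.Int.floordiv_two_mid_bounds h
      set m := PySem.Int.floordiv (left + r) 2 with hm
      have hmlen : m < (lyrics.length : Int) := by omega
      have hget : PySem.List.pyGet? lyrics m = some lyrics[m.toNat] :=
        PySem.List.pyGet?_eq_some_getElem lyrics (by omega) hmlen
      have hmt : m.toNat < lyrics.length := by omega
      rw [hget]
      have hc := C m.toNat hmt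
      by_cases hp : lyrics[m.toNat].1 ≤ pos
      · have hmL : m.toNat < lyrL lyrics pos := hc.mp hp
        simp only [Option.getD_some, hp, if_pos]
        have h' := ih (m + 1) r (by omega) (by omega) hr (by omega) hL2
        rw [show m + 1 - 1 = m by omega] at h'
        exact h'
      · have hmL : ¬ m.toNat < lyrL lyrics pos := fun hh => hp (hc.mpr hh)
        simp only [Option.getD_some, hp, if_neg, not_false_iff]
        exact ih left (m - 1) (by omega) h0 (by omega) hL1 (by omega)
    · simp [h]; omega

-- B's fold returns L - 1 given the position characterization (generalized over the enumerate start)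
lemma fold_eq (pos : Int) (L : Nat) :
    ∀ (xs : List (Int × String)) (s : Nat) (init : Int),
      (∀ j (h : j < xs.length), (xs[j].1 ≤ pos ↔ s + j < L)) →
      init = min (s : Int) (L : Int) - 1 →
      (PySem.List.enumerate xs (s : Int)).foldl
        (fun acc ip => if ip.2.1 ≤ pos then ip.1 else acc) init
      = min ((s : Int) + xs.length) (L : Int) - 1 := by
  intro xs
  induction xs with
  | nil => intro s init _ hinit; simp [PySem.List.enumerate_nil, hinit]
  | cons x xs ih =>
    intro s init hC hinit
    rw [PySem.List.enumerate_cons, List.foldl_cons]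
    have h0 := hC 0 (by simp)
    simp only [List.getElem_cons_zero, Nat.add_zero] at h0
    have hshift : ∀ j (h : j < xs.length), (xs[j].1 ≤ pos ↔ (s + 1) + j < L) := by
      intro j hj
      have := hC (j + 1) (by simpa using Nat.succ_lt_succ hj)
      simpa [Nat.add_comm, Nat.add_left_comm, Nat.add_assoc] using this
    by_cases hp : x.1 ≤ pos
    · have hsL : s < L := h0.mp hp
      have hrec := ih (s + 1) ((s : Int)) hshift (by push_cast; omega)
      simp only [hp, if_pos]
      push_cast at hrec ⊢
      rw [hrec]
      simp only [List.length_cons]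
      push_cast
      omega
    · have hsL : ¬ s < L := fun hh => hp (h0.mpr hh)
      have hrec := ih (s + 1) init hshift (by rw [hinit]; push_cast; omega)
      simp only [hp, if_neg, not_false_iff]
      push_cast at hrec ⊢
      rw [hrec]
      simp only [List.length_cons]
      push_cast
      omega

-- ===== VERDICT (by name: the statement is the Claim_ definition above) =====
theorem get_lyric_spec : Claim_equal_get_lyric := by
  intro lyrics pos _ hpre
  unfold Spec_get_lyric get_lyric get_lyric_alt
  by_cases hnil : lyrics = []
  · simp [hnil]
  · simp only [hnil, if_neg, not_false_iff]
    have C := lyrL_char lyrics pos hpre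
    have hlen : 0 < lyrics.length := List.length_pos_iff.mpr hnil
    have hL := lyrL_le lyrics pos
    have hA : getLyricLoop lyrics pos 0 ((lyrics.length : Int) - 1) (-1)
        = (lyrL lyrics pos : Int) - 1 := by
      have := getLyricLoop_eq lyrics pos C ((lyrics.length : Int) - 0 + 0).toNat 0
        ((lyrics.length : Int) - 1) (by omega) (by omega) (by omega) (by omega)
        (by omega)
      simpa using this
    have hB : (PySem.List.enumerate lyrics (0 : Int)).foldl
        (fun acc ip => if ip.2.1 ≤ pos then ip.1 else acc) (-1)
        = (lyrL lyrics pos : Int) - 1 := by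
      have hrec := fold_eq pos (lyrL lyrics pos) lyrics 0 (-1)
        (fun j hj => by simpa using C j hj)
        (by omega)
      push_cast at hrec
      rw [hrec]
      omega
    rw [hA, hB]
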